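-- pv_equiv track=rewrite | github.com/shereenb/navigating_compliance | code_examples/mcp_server.py | filter_by_role
-- ===== SOURCE A (Python) =====
-- from typing import Any, Dict, Optional
--
-- def filter_by_role(data: Dict, user_role: str) -> Dict:
--     """Surface 1: Tool Boundaries - Role-based data filtering"""
--     role_filters = {
--         "executive": ["summary", "trends", "aggregates"],
--         "facility_manager": ["summary", "trends", "aggregates", "details"],
--         "department_lead": ["summary", "aggregates"],
--         "analyst": ["summary", "trends", "aggregates", "historical"]
--     }
--
--     allowed_fields = role_filters.get(user_role, ["summary"])
--
--     filtered = {}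
--     for field in allowed_fields:
--         if field in data:
--             filtered[field] = data[field]
--
--     return filtered
-- ===== SOURCE B (Python) =====
-- def filter_by_role(data, user_role):
--     """Surface 1: Tool Boundaries - Role-based data filtering"""
--     role_filters = {
--         "executive": ["summary", "trends", "aggregates"],
--         "facility_manager": ["summary", "trends", "aggregates", "details"],
--         "department_lead": ["summary", "aggregates"],
--         "analyst": ["summary", "trends", "aggregates", "historical"]
--     }
--     allowed = set(role_filters.get(user_role, ["summary"]))
--     # one pass over the input, driven by the data rather than the allow-list
--     picked = {k: v for k, v in data.items() if k in allowed}
--     # emit in the fixed master field order (every allow-list is a subsequence of it)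
--     field_order = ("summary", "trends", "aggregates", "details", "historical")
--     return {k: picked[k] for k in field_order if k in picked}
-- ===== Notes on version B (the rewrite author's own statement) =====
-- stated objective: alternative
-- what changed: B reverses the driving traversal: instead of looping over the role's allow-list and probing the dict, it makes one pass over the data keeping keys in the allow-list set, then emits the kept pairs in the fixed master field order; output is identical including insertion order because every allow-list is a subsequence of that master order.
import Mathlib
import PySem

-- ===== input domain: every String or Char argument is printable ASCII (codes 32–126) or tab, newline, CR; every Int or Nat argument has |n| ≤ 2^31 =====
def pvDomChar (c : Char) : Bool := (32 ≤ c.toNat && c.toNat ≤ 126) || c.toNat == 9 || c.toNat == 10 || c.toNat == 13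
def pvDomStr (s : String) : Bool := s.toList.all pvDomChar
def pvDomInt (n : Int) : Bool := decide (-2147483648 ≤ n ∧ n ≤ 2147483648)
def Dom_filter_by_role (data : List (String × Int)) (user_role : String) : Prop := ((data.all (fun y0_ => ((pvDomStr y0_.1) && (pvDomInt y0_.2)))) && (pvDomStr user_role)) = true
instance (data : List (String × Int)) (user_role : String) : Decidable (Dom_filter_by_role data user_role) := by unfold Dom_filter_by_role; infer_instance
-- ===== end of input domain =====

-- B reverses the driving traversal: one pass over the data keeping allow-listed keys, then a
-- fixed-master-order emission, instead of probing the dict per allow-list field; same result.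


-- ===== PORT A =====
-- the literal role_filters dict both Pythons build
def pvRoleFilters : PySem.Dict String (List String) :=
  PySem.Dict.ofList
    [("executive", ["summary", "trends", "aggregates"]),
     ("facility_manager", ["summary", "trends", "aggregates", "details"]),
     ("department_lead", ["summary", "aggregates"]),
     ("analyst", ["summary", "trends", "aggregates", "historical"])]

def filter_by_role (data : List (String × Int)) (user_role : String) : List (String × Int) :=
  let d := PySem.Dict.ofList data        -- the dict argument (assoc list → dict, as Python dict(...))
  let allowed_fields := pvRoleFilters.getD user_role ["summary"]
  let filtered := allowed_fields.foldl   -- for field in allowed_fields: if field in data: filtered[field] = data[field]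
    (fun f field =>
      match d.get? field with
      | some v => f.insert field v
      | none => f) PySem.Dict.empty
  filtered.items

-- ===== PORT B =====
def pvFieldOrder : List String := ["summary", "trends", "aggregates", "details", "historical"]

def filter_by_role_alt (data : List (String × Int)) (user_role : String) : List (String × Int) :=
  let allowed : PySem.Set String := PySem.Set.ofList (pvRoleFilters.getD user_role ["summary"])
  -- picked = {k: v for k, v in data.items() if k in allowed}
  let picked := ((PySem.Dict.ofList data).items.filter (fun kv => allowed.contains kv.1)).foldl
    (fun f kv => f.insert kv.1 kv.2) PySem.Dict.empty
  -- {k: picked[k] for k in field_order if k in picked}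
  let out := pvFieldOrder.foldl
    (fun f k =>
      match picked.get? k with
      | some v => f.insert k v
      | none => f) PySem.Dict.empty
  out.items

-- ===== PRECONDITION & SPEC =====
def Spec_filter_by_role (data : List (String × Int)) (user_role : String) (out : List (String × Int)) : Prop := out = filter_by_role_alt data user_role
instance (data : List (String × Int)) (user_role : String) (out : List (String × Int)) : Decidable (Spec_filter_by_role data user_role out) := by unfold Spec_filter_by_role; infer_instance

-- ===== CLAIM (what is proved, stated in full; the proofs are below) =====
def Claim_equal_filter_by_role : Prop := ∀ (data : List (String × Int)) (user_role : String), Dom_filter_by_role data user_role → Spec_filter_by_role data user_role (filter_by_role data user_role)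

-- ===== LEMMAS AND PROOFS =====

-- the common loop shape: for field in l: if field in d: out[field] = d[field]
def pvLoop (d : PySem.Dict String Int) (l : List String) (f0 : PySem.Dict String Int) :
    PySem.Dict String Int :=
  l.foldl
    (fun f field =>
      match d.get? field with
      | some v => f.insert field v
      | none => f) f0

-- looking a key up in the filtered assoc list = guarded lookup in the original
lemma pv_get_filter (xs : List (String × Int)) (al : List String) (k : String) :
    (PySem.Dict.mk (xs.filter (fun kv => al.contains kv.1))).get? k
      = if al.contains k then (PySem.Dict.mk xs).get? k else none := by
  induction xs with
  | nil => cases h : al.contains k <;> simp only [List.filter_nil, if_true] <;> rfl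
  | cons p xs ih =>
    rw [List.filter_cons]
    by_cases hpk : p.1 = k
    · subst hpk
      cases hc : al.contains p.1
      · rw [if_neg (by simpa using hc), ih, hc]
        simp
      · rw [if_pos (by simpa using hc)]
        rw [PySem.Dict.get?_mk_cons, PySem.Dict.get?_mk_cons]
        simp
    · have hne : (p.1 == k) = false := by simp [hpk]
      cases hcp : al.contains p.1
      · rw [if_neg (by simpa using hcp), ih, PySem.Dict.get?_mk_cons, hne]
        simp
      · rw [if_pos (by simpa using hcp), PySem.Dict.get?_mk_cons, hne, ih,
          PySem.Dict.get?_mk_cons, hne]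
        simp

-- the loop over l reading pk = the loop over (l restricted to al) reading dd
lemma pv_loop_filter (al : List String) (pk dd : PySem.Dict String Int)
    (H : ∀ k, pk.get? k = if al.contains k then dd.get? k else none) :
    ∀ (l : List String) (f0 : PySem.Dict String Int),
      pvLoop pk l f0 = pvLoop dd (l.filter (fun k => al.contains k)) f0 := by
  intro l
  induction l with
  | nil => intro f0; rfl
  | cons k l ih =>
    intro f0
    cases hc : al.contains k
    · have hk : pk.get? k = none := by rw [H k, hc]; rfl
      rw [pvLoop, List.foldl_cons, hk, List.filter_cons, if_neg (by simpa using hc)]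
      exact ih f0
    · have hk : pk.get? k = dd.get? k := by rw [H k, hc]; rfl
      rw [pvLoop, List.foldl_cons, hk, List.filter_cons, if_pos (by simpa using hc), pvLoop,
        List.foldl_cons]
      cases dd.get? k <;> exact ih _

-- B's dict comprehension (a fold of inserts over the filtered items) is that filtered assoc list
lemma pv_picked_eq_mk (data : List (String × Int)) (al : List String) :
    (((PySem.Dict.ofList data).items.filter (fun kv => al.contains kv.1)).foldl
        (fun f kv => f.insert kv.1 kv.2) PySem.Dict.empty)
      = PySem.Dict.mk ((PySem.Dict.ofList data).items.filter (fun kv => al.contains kv.1)) := by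
  apply PySem.Dict.ext
  have hnd : (((PySem.Dict.ofList data).items.filter (fun kv => al.contains kv.1)).map
      Prod.fst).Nodup :=
    (PySem.Dict.nodup_keys_ofList data).sublist (List.filter_sublist.map Prod.fst)
  rw [PySem.Dict.items_foldl_insert_fresh _ _ _ _ (fun a _ => PySem.Dict.contains_empty a.1) hnd]
  simp
  rfl

lemma pv_main (data : List (String × Int)) (u : String)
    (h : pvFieldOrder.filter
        (fun k => (PySem.Set.ofList (pvRoleFilters.getD u ["summary"])).contains k)
      = pvRoleFilters.getD u ["summary"]) :
    filter_by_role data u = filter_by_role_alt data u := by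
  show (pvLoop (PySem.Dict.ofList data) (pvRoleFilters.getD u ["summary"]) PySem.Dict.empty).items
      = (pvLoop (((PySem.Dict.ofList data).items.filter
            (fun kv => (PySem.Set.ofList (pvRoleFilters.getD u ["summary"])).contains kv.1)).foldl
          (fun f kv => f.insert kv.1 kv.2) PySem.Dict.empty) pvFieldOrder PySem.Dict.empty).items
  simp only [PySem.Set.contains_eq_listContains] at h ⊢
  generalize hal : (PySem.Set.ofList (pvRoleFilters.getD u ["summary"]) : List String) = al at h ⊢
  have H : ∀ k, (((PySem.Dict.ofList data).items.filter (fun kv => List.contains al kv.1)).foldl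
        (fun f kv => f.insert kv.1 kv.2) PySem.Dict.empty).get? k
      = if List.contains al k then (PySem.Dict.ofList data).get? k else none := by
    intro k
    rw [pv_picked_eq_mk data al, pv_get_filter]
  rw [pv_loop_filter al _ (PySem.Dict.ofList data) H pvFieldOrder PySem.Dict.empty, h]

lemma pv_getD_default (u : String)
    (h1 : u ≠ "executive") (h2 : u ≠ "facility_manager")
    (h3 : u ≠ "department_lead") (h4 : u ≠ "analyst") :
    pvRoleFilters.getD u ["summary"] = ["summary"] := by
  have hmk : pvRoleFilters = PySem.Dict.mk
      [("executive", ["summary", "trends", "aggregates"]),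
       ("facility_manager", ["summary", "trends", "aggregates", "details"]),
       ("department_lead", ["summary", "aggregates"]),
       ("analyst", ["summary", "trends", "aggregates", "historical"])] := by decide
  rw [PySem.Dict.getD_eq_get?_getD, hmk]
  simp [PySem.Dict.get?, Ne.symm h1, Ne.symm h2, Ne.symm h3, Ne.symm h4]

-- ===== VERDICT (by name: the statement is the Claim_ definition above) =====
theorem filter_by_role_spec : Claim_equal_filter_by_role := by
  intro data u _
  unfold Spec_filter_by_role
  apply pv_main
  by_cases h1 : u = "executive"
  · subst h1; decide
  by_cases h2 : u = "facility_manager"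
  · subst h2; decide
  by_cases h3 : u = "department_lead"
  · subst h3; decide
  by_cases h4 : u = "analyst"
  · subst h4; decide
  rw [pv_getD_default u h1 h2 h3 h4]; decide
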